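-- pv_equiv track=rewrite | github.com/dainshon/CODING | 백준/Gold/2661. 좋은수열/좋은수열.py | check_good_array
-- ===== SOURCE A (Python) =====
-- def check_good_array(arr): # 좋은 수열인지 체크
--     arr_len = len(arr)
--     for g_len in range(2,arr_len//2+1):
--         flag = 0
--         for n in range(g_len):
--             if arr[-(2*g_len)+n] != arr[-g_len+n]:
--                 flag = 1
--                 break
--         if flag == 0: # g_len 개의 수열이 같다
--             return 0
--     return 1
-- ===== SOURCE B (Python) =====
-- def check_good_array(arr):
--     # Z-algorithm on the reversed array: z[i] = length of the longest common
--     # prefix of r and r[i:].  The array ends in a square of half-length g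
--     # iff z[g] >= g on r = reversed(arr), so one Z pass decides every g at once.
--     r = arr[::-1]
--     n = len(r)
--     z = [0] * n
--     l = 0
--     rt = 0
--     for i in range(1, n):
--         zi = 0
--         if i < rt:
--             zi = min(rt - i, z[i - l])
--         while i + zi < n and r[zi] == r[i + zi]:
--             zi += 1
--         z[i] = zi
--         if i + zi > rt:
--             l = i
--             rt = i + zi
--     for g in range(2, n // 2 + 1):
--         if z[g] >= g:
--             return 0
--     return 1
-- ===== Notes on version B (the rewrite author's own statement) =====
-- stated objective: alternative
-- what changed: Replaces A's per-gap rescan (for every half-length g, compare the last g elements against the preceding g with a mismatch flag) with a single Z-algorithm pass over the reversed array that maintains a match window (l, rt), then reads off 'square of half-length g exists iff z[g] >= g' for each g.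
import Mathlib
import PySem

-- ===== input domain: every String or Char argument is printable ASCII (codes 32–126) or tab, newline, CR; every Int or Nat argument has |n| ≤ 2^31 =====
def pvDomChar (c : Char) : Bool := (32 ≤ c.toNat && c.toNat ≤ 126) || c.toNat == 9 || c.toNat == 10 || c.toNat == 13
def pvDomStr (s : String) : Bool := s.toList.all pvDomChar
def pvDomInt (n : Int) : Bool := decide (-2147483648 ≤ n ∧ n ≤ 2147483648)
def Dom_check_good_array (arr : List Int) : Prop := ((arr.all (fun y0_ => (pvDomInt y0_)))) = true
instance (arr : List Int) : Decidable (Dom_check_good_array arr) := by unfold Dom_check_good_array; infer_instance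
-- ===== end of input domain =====

-- B replaces A's per-gap rescanning with one Z-algorithm pass over the reversed
-- array (z[g] = lcp of r and r[g:]; a square suffix of half-length g exists iff
-- z[g] >= g): a genuinely different algorithm of the same measured cost.


-- ===== PORT A =====
-- inner 'for n in range(g_len)' loop: flag starts at 0, sticks at 1 after a mismatch
-- (the break is modelled by the fold keeping flag = 1; the compared indices are always
-- in range for the g_len values the outer loop produces, so Option equality is exact).
def aInner (arr : List Int) (g_len : Int) : Int :=
  (PySem.List.pyRange 0 g_len 1).foldl
    (fun flag n =>
      if flag = 1 then flag
      else if PySem.List.pyGet? arr (-(2*g_len)+n) ≠ PySem.List.pyGet? arr (-g_len+n) then 1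
      else flag) 0

-- outer 'for g_len in range(2, arr_len//2+1)' with early 'return 0'
def check_good_array (arr : List Int) : Int :=
  let arr_len : Int := arr.length
  match (PySem.List.pyRange 2 (PySem.Int.floordiv arr_len 2 + 1) 1).foldl
    (fun acc g_len =>
      match acc with
      | some v => some v
      | none => if aInner arr g_len = 0 then some 0 else none) none with
  | some v => v
  | none => 1

-- ===== PORT B =====
-- the while loop 'while i + zi < n and r[zi] == r[i + zi]: zi += 1'; each
-- iteration increases i + zi, which stays < n, so fuel n makes it structural
def zExtend (r : List Int) (i : Nat) : Nat → Nat → Nat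
  | z, fuel + 1 =>
    if i + z < r.length then
      if r.getD z 0 = r.getD (i + z) 0 then zExtend r i (z + 1) fuel else z
    else z
  | z, 0 => z

-- one iteration of 'for i in range(1, n)': state (z, l, rt)
def zStep (r : List Int) (st : List Nat × Nat × Nat) (i : Int) : List Nat × Nat × Nat :=
  match st with
  | (z, l, rt) =>
    let iN := i.toNat
    let z0 := if iN < rt then min (rt - iN) (z.getD (iN - l) 0) else 0
    let zi := zExtend r iN z0 r.length
    if rt < iN + zi then (z.set iN zi, iN, iN + zi) else (z.set iN zi, l, rt)

def check_good_array_alt (arr : List Int) : Int :=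
  let r := arr.reverse                -- arr[::-1]
  let n := r.length
  let st := (PySem.List.pyRange 1 (n : Int) 1).foldl (zStep r) (List.replicate n 0, 0, 0)
  match (PySem.List.pyRange 2 (PySem.Int.floordiv (n : Int) 2 + 1) 1).foldl
    (fun acc g =>
      match acc with
      | some v => some v
      | none => if (g : Int) ≤ (st.1.getD g.toNat 0 : Int) then some 0 else none) none with
  | some v => v
  | none => 1

-- ===== PRECONDITION & SPEC =====
def Spec_check_good_array (arr : List Int) (out : Int) : Prop := out = check_good_array_alt arr
instance (arr : List Int) (out : Int) : Decidable (Spec_check_good_array arr out) := by unfold Spec_check_good_array; infer_instance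

-- ===== CLAIM (what is proved, stated in full; the proofs are below) =====
def Claim_equal_check_good_array : Prop := ∀ (arr : List Int), Dom_check_good_array arr → Spec_check_good_array arr (check_good_array arr)

-- ===== LEMMAS AND PROOFS =====

-- proof-side spec: length of the longest common prefix
def lcpN : List Int → List Int → Nat
  | a :: xs, b :: ys => if a = b then lcpN xs ys + 1 else 0
  | _, _ => 0

lemma lcpN_le_right (xs ys : List Int) : lcpN xs ys ≤ ys.length := by
  induction xs generalizing ys with
  | nil => cases ys <;> simp [lcpN]
  | cons a xs ih =>
    cases ys with
    | nil => simp [lcpN]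
    | cons b ys =>
      by_cases h : a = b
      · have := ih ys
        simp only [lcpN, if_pos h, List.length_cons]
        omega
      · simp [lcpN, h]

lemma lcpN_spec (xs ys : List Int) : ∀ j < lcpN xs ys, xs[j]? = ys[j]? := by
  induction xs generalizing ys with
  | nil => intro j hj; cases ys <;> simp [lcpN] at hj
  | cons a xs ih =>
    cases ys with
    | nil => intro j hj; simp [lcpN] at hj
    | cons b ys =>
      intro j hj
      by_cases hab : a = b
      · subst hab
        cases j with
        | zero => simp
        | succ j =>
          simp only [List.getElem?_cons_succ]
          exact ih ys j (by simp only [lcpN, if_pos trivial] at hj; omega)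
      · simp [lcpN, hab] at hj

-- determinacy: first m positions match and position m stops the scan
lemma lcpN_eq (xs ys : List Int) (m : Nat) (h1 : m ≤ xs.length) (h2 : m ≤ ys.length)
    (hm : ∀ j < m, xs[j]? = ys[j]?)
    (hstop : xs.length = m ∨ ys.length = m ∨ xs[m]? ≠ ys[m]?) : lcpN xs ys = m := by
  induction xs generalizing ys m with
  | nil =>
    have hm0 : m = 0 := by simpa using h1
    subst hm0
    cases ys <;> simp [lcpN]
  | cons a xs ih =>
    cases ys with
    | nil =>
      have : m = 0 := by simpa using h2
      subst this
      simp [lcpN]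
    | cons b ys =>
      cases m with
      | zero =>
        rcases hstop with h | h | h
        · simp at h
        · simp at h
        · have hab : a ≠ b := by simpa using h
          simp [lcpN, hab]
      | succ m =>
        have hab : a = b := by
          have := hm 0 (by omega)
          simpa using this
        subst hab
        simp only [lcpN, if_pos trivial]
        have : lcpN xs ys = m := by
          apply ih ys m (by simpa using h1) (by simpa using h2)
          · intro j hj
            have := hm (j + 1) (by omega)
            simpa using this
          · rcases hstop with h | h | h
            · left; simpa using h
            · right; left; simpa using h
            · right; right; simpa using h
        omega

lemma lcpN_ge_iff (g : Nat) (xs ys : List Int)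
    (hx : g ≤ xs.length) (hy : g ≤ ys.length) :
    (g ≤ lcpN xs ys ↔ xs.take g = ys.take g) := by
  induction g generalizing xs ys with
  | zero => simp
  | succ g ih =>
    cases xs with
    | nil => simp at hx
    | cons a xs =>
      cases ys with
      | nil => simp at hy
      | cons b ys =>
        simp only [List.length_cons] at hx hy
        by_cases hab : a = b
        · subst hab
          simp only [lcpN, if_pos trivial, List.take_succ_cons, List.cons.injEq, true_and]
          rw [← ih xs ys (by omega) (by omega)]
          omega
        · rw [show lcpN (a :: xs) (b :: ys) = 0 from by simp [lcpN, hab]]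
          refine iff_of_false (by omega) ?_
          simp [List.take_succ_cons, hab]

-- the while loop computes the exact lcp when its first z characters already match
lemma zExtend_eq (r : List Int) (i : Nat) (hi : 1 ≤ i) :
    ∀ (fuel z : Nat), r.length - (i + z) ≤ fuel → i + z ≤ r.length →
      (∀ j < z, r[j]? = r[i + j]?) → zExtend r i z fuel = lcpN r (r.drop i) := by
  intro fuel
  induction fuel with
  | zero =>
    intro z hf hle hm
    have hz : i + z = r.length := by omega
    show z = lcpN r (r.drop i)
    symm
    apply lcpN_eq r (r.drop i) z (by omega) (by simp; omega)
    · intro j hj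
      rw [List.getElem?_drop]
      exact hm j hj
    · right; left; simp; omega
  | succ fuel ih =>
    intro z hf hle hm
    by_cases hlt : i + z < r.length
    · have hzlt : z < r.length := by omega
      rw [zExtend, if_pos hlt]
      by_cases heq : r.getD z 0 = r.getD (i + z) 0
      · rw [if_pos heq]
        apply ih (z + 1) (by omega) (by omega)
        intro j hj
        rcases Nat.lt_succ_iff_lt_or_eq.mp hj with h | h
        · exact hm j h
        · subst h
          rw [List.getElem?_eq_getElem hzlt, List.getElem?_eq_getElem hlt]
          rw [List.getD_eq_getElem r 0 hzlt, List.getD_eq_getElem r 0 hlt] at heq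
          exact congrArg some heq
      · rw [if_neg heq]
        symm
        apply lcpN_eq r (r.drop i) z (by omega) (by simp; omega)
        · intro j hj
          rw [List.getElem?_drop]
          exact hm j hj
        · right; right
          rw [List.getElem?_drop]
          rw [List.getElem?_eq_getElem hzlt, List.getElem?_eq_getElem hlt]
          intro hcontra
          apply heq
          rw [List.getD_eq_getElem r 0 hzlt, List.getD_eq_getElem r 0 hlt]
          exact Option.some.inj hcontra
    · rw [zExtend, if_neg hlt]
      have hz : i + z = r.length := by omega
      symm
      apply lcpN_eq r (r.drop i) z (by omega) (by simp; omega)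
      · intro j hj
        rw [List.getElem?_drop]
        exact hm j hj
      · right; left; simp; omega

-- loop invariant of the Z pass: processed entries hold the exact lcp, (l, rt)
-- is a verified match window
def ZInv (r : List Int) (i : Nat) (st : List Nat × Nat × Nat) : Prop :=
  st.1.length = r.length ∧
  (∀ j < r.length, st.1.getD j 0 = if 1 ≤ j ∧ j < i then lcpN r (r.drop j) else 0) ∧
  st.2.1 < i ∧ st.2.2 ≤ r.length ∧ st.2.2 - st.2.1 ≤ lcpN r (r.drop st.2.1)

lemma ZInv_init (r : List Int) : ZInv r 1 (List.replicate r.length 0, 0, 0) := by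
  unfold ZInv
  refine ⟨by simp, ?_, by simp, by simp, by simp⟩
  intro j hj
  rw [List.getD_eq_getElem?_getD, List.getElem?_replicate, if_pos hj, if_neg (by omega)]
  rfl

lemma ZInv_mono (r : List Int) (i i' : Nat) (st : List Nat × Nat × Nat)
    (hle : i ≤ i') (hni : r.length ≤ i) (h : ZInv r i st) : ZInv r i' st := by
  unfold ZInv at h ⊢
  obtain ⟨h1, h2, h3, h4, h5⟩ := h
  refine ⟨h1, ?_, by omega, h4, h5⟩
  intro j hj
  rw [h2 j hj]
  have : (1 ≤ j ∧ j < i) ↔ (1 ≤ j ∧ j < i') := by omega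
  rw [if_congr this rfl rfl]

lemma zStep_inv (r : List Int) (i : Nat) (z : List Nat) (l rt : Nat)
    (hi : 1 ≤ i) (hin : i < r.length) (h : ZInv r i (z, l, rt)) :
    ZInv r (i + 1) (zStep r (z, l, rt) (i : Int)) := by
  unfold ZInv at h ⊢
  obtain ⟨hlen, hent, hl, hrtn, hwin⟩ := h
  dsimp only at hlen hent hl hrtn hwin
  simp only [zStep, Int.toNat_natCast]
  set z0 := if i < rt then min (rt - i) (z.getD (i - l) 0) else 0 with hz0
  have hz0le : i + z0 ≤ r.length := by
    by_cases hir : i < rt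
    · have h1 : z0 ≤ rt - i := by rw [hz0, if_pos hir]; exact min_le_left _ _
      omega
    · rw [hz0, if_neg hir]; omega
  have hmatch : ∀ j < z0, r[j]? = r[i + j]? := by
    intro j hj
    by_cases hir : i < rt
    · rw [hz0, if_pos hir] at hj
      have hj1 : j < rt - i := lt_of_lt_of_le hj (min_le_left _ _)
      have hj2 : j < z.getD (i - l) 0 := lt_of_lt_of_le hj (min_le_right _ _)
      by_cases hl0 : 1 ≤ l
      case neg =>
        -- l = 0: the window start is the unprocessed entry i, stored as 0
        exfalso
        have := hent (i - l) (by omega)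
        rw [if_neg (by omega)] at this
        rw [this] at hj2
        omega
      have hil : z.getD (i - l) 0 = lcpN r (r.drop (i - l)) := by
        have := hent (i - l) (by omega)
        rwa [if_pos (by omega : 1 ≤ i - l ∧ i - l < i)] at this
      rw [hil] at hj2
      have e1 : r[j]? = r[(i - l) + j]? := by
        have := lcpN_spec r (r.drop (i - l)) j hj2
        rwa [List.getElem?_drop] at this
      have ht : (i - l) + j < lcpN r (r.drop l) := by omega
      have e2 := lcpN_spec r (r.drop l) _ ht
      rw [List.getElem?_drop, show l + ((i - l) + j) = i + j from by omega] at e2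
      rw [e1, e2]
    · rw [hz0, if_neg hir] at hj; omega
  have hzi : zExtend r i z0 r.length = lcpN r (r.drop i) :=
    zExtend_eq r i hi r.length z0 (by omega) hz0le hmatch
  rw [hzi]
  have hlcp_le : lcpN r (r.drop i) ≤ r.length - i := by
    have := lcpN_le_right r (r.drop i)
    simpa using this
  have hent' : ∀ j < r.length, (z.set i (lcpN r (r.drop i))).getD j 0 =
      if 1 ≤ j ∧ j < i + 1 then lcpN r (r.drop j) else 0 := by
    intro j hj
    rw [List.getD_eq_getElem?_getD, List.getElem?_set]
    by_cases hji : i = j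
    · subst hji
      rw [if_pos rfl, if_pos (by omega), if_pos (by omega)]
      rfl
    · rw [if_neg hji, ← List.getD_eq_getElem?_getD, hent j hj]
      have : (1 ≤ j ∧ j < i) ↔ (1 ≤ j ∧ j < i + 1) := by omega
      rw [if_congr this rfl rfl]
  by_cases hb : rt < i + lcpN r (r.drop i)
  · rw [if_pos hb]
    refine ⟨by simpa using hlen, hent', by dsimp only; omega, by dsimp only; omega, by dsimp only; simp⟩
  · rw [if_neg hb]
    refine ⟨by simpa using hlen, hent', by dsimp only; omega, by dsimp only; exact hrtn, by dsimp only; exact hwin⟩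

lemma zfold_inv (r : List Int) :
    ∀ (m i : Nat) (st : List Nat × Nat × Nat), 1 ≤ i → r.length ≤ i + m → ZInv r i st →
      ZInv r (i + m) ((PySem.List.pyRange (i : Int) (r.length : Int) 1).foldl (zStep r) st) := by
  intro m
  induction m with
  | zero =>
    intro i st hi hn h
    rw [PySem.List.pyRange_one_eq_nil (by exact_mod_cast hn)]
    simpa using h
  | succ m ih =>
    intro i st hi hn h
    by_cases hin : i < r.length
    · rw [PySem.List.pyRange_one_cons (by exact_mod_cast hin), List.foldl_cons]
      obtain ⟨z, l, rt⟩ := st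
      have hstep := zStep_inv r i z l rt hi hin h
      have := ih (i + 1) _ (by omega) (by omega) hstep
      rw [show ((i : Int) + 1) = ((i + 1 : Nat) : Int) from by push_cast; ring,
          show i + (m + 1) = (i + 1) + m from by omega]
      exact this
    · rw [PySem.List.pyRange_one_eq_nil (by exact_mod_cast Nat.le_of_not_lt hin)]
      simp only [List.foldl_nil]
      exact ZInv_mono r i (i + m + 1) st (by omega) (by omega) h

-- ===== A-side lemmas (flag fold, negative indexing, block reindexing) =====

lemma flag_fold_one (f : Int → Option Int × Option Int) (l : List Int) :
    l.foldl (fun flag n =>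
      if flag = (1:Int) then flag
      else if (f n).1 ≠ (f n).2 then 1 else flag) 1 = 1 := by
  induction l with
  | nil => rfl
  | cons x xs ih => simpa using ih

lemma flag_fold_zero_iff (f : Int → Option Int × Option Int) (l : List Int) :
    (l.foldl (fun flag n =>
      if flag = (1:Int) then flag
      else if (f n).1 ≠ (f n).2 then 1 else flag) 0 = 0)
    ↔ ∀ n ∈ l, (f n).1 = (f n).2 := by
  induction l with
  | nil => simp
  | cons x xs ih =>
    by_cases h : (f x).1 = (f x).2
    · conv_lhs => rw [List.foldl_cons]
      rw [show (if (0:Int) = 1 then (0:Int) else if (f x).1 ≠ (f x).2 then 1 else 0) = 0 from by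
        simp [h]]
      rw [ih]
      constructor
      · intro hall n hn
        rcases List.mem_cons.mp hn with rfl | hn
        · exact h
        · exact hall n hn
      · intro hall n hn
        exact hall n (List.mem_cons_of_mem _ hn)
    · conv_lhs => rw [List.foldl_cons]
      rw [show (if (0:Int) = 1 then (0:Int) else if (f x).1 ≠ (f x).2 then 1 else 0) = 1 from by
        simp [h]]
      rw [flag_fold_one f xs]
      refine iff_of_false (by norm_num) ?_
      intro hall
      exact h (hall x (by simp))

-- negative in-range index, general integer form
lemma pyGet?_neg_int (xs : List Int) (i : Int) (h0 : i < 0) (h1 : -(xs.length : Int) ≤ i) :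
    PySem.List.pyGet? xs i = xs[(xs.length - (-i).toNat)]? := by
  have hk : i = -(((-i).toNat : Nat) : Int) := by omega
  rw [hk, PySem.List.pyGet?_neg_natCast _ _ (by omega) (by omega)]
  congr 1
  omega

lemma getElem?_take_drop (xs : List Int) (a g k : Nat) :
    ((xs.drop a).take g)[k]? = if k < g then xs[a + k]? else none := by
  by_cases h : k < g
  · rw [List.getElem?_take_of_lt h, List.getElem?_drop]
    simp [h]
  · simp [h]

lemma block_eq_iff (xs : List Int) (a b g : Nat) :
    ((xs.drop a).take g = (xs.drop b).take g) ↔ ∀ k < g, xs[a + k]? = xs[b + k]? := by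
  constructor
  · intro h k hk
    have := congrArg (fun l => l[k]?) h
    simpa [getElem?_take_drop, hk] using this
  · intro h
    apply List.ext_getElem?
    intro k
    rw [getElem?_take_drop, getElem?_take_drop]
    by_cases hk : k < g
    · simp [hk, h k hk]
    · simp [hk]

-- pointwise reindexing k ↦ gN-1-k between the two block comparisons
lemma ptwise (arr : List Int) (n gN : Nat) (h2 : 2*gN ≤ n) :
    (∀ k < gN, arr[n - 2*gN + k]? = arr[n - gN + k]?)
    ↔ (∀ k < gN, arr[n - 1 - k]? = arr[n - 1 - (gN + k)]?) := by
  constructor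
  · intro h k hk
    have hm := h (gN - 1 - k) (by omega)
    rw [show n - 2*gN + (gN - 1 - k) = n - 1 - (gN + k) from by omega,
        show n - gN + (gN - 1 - k) = n - 1 - k from by omega] at hm
    exact hm.symm
  · intro h k hk
    have hm := h (gN - 1 - k) (by omega)
    rw [show n - 1 - (gN - 1 - k) = n - gN + k from by omega,
        show n - 1 - (gN + (gN - 1 - k)) = n - 2*gN + k from by omega] at hm
    exact hm.symm

-- core pointwise equivalence for an admissible g
lemma cond_iff (arr : List Int) (g : Int) (hg2 : 2 ≤ g) (hgn : 2 * g ≤ (arr.length : Int)) :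
    (aInner arr g = 0 ↔ g ≤ (lcpN arr.reverse (arr.reverse.drop g.toNat) : Int)) := by
  have h2 : 2 * g.toNat ≤ arr.length := by omega
  have hA : aInner arr g = 0 ↔ ∀ m ∈ PySem.List.pyRange 0 g 1,
      PySem.List.pyGet? arr (-(2*g)+m) = PySem.List.pyGet? arr (-g+m) :=
    flag_fold_zero_iff
      (fun m => (PySem.List.pyGet? arr (-(2*g)+m), PySem.List.pyGet? arr (-g+m))) _
  rw [hA]
  have hB := lcpN_ge_iff g.toNat arr.reverse (arr.reverse.drop g.toNat)
      (by simp; omega) (by simp; omega)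
  have hB2 : (g ≤ (lcpN arr.reverse (arr.reverse.drop g.toNat) : Int)) ↔
      (arr.reverse.take g.toNat = (arr.reverse.drop g.toNat).take g.toNat) := by
    rw [← hB]
    omega
  rw [hB2]
  have hblock := block_eq_iff arr.reverse 0 g.toNat g.toNat
  rw [List.drop_zero] at hblock
  simp only [Nat.zero_add] at hblock
  rw [hblock]
  have hBpt : (∀ k < g.toNat, arr.reverse[k]? = arr.reverse[g.toNat + k]?)
      ↔ (∀ k < g.toNat, arr[arr.length - 1 - k]? = arr[arr.length - 1 - (g.toNat + k)]?) := by
    constructor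
    · intro h k hk
      have hm := h k hk
      rwa [List.getElem?_reverse (by omega), List.getElem?_reverse (by omega)] at hm
    · intro h k hk
      rw [List.getElem?_reverse (by omega), List.getElem?_reverse (by omega)]
      exact h k hk
  rw [hBpt, ← ptwise arr arr.length g.toNat h2]
  constructor
  · intro h k hk
    have hm := h (k : Int) (by rw [PySem.List.mem_pyRange_one]; omega)
    rw [pyGet?_neg_int _ _ (by omega) (by omega), pyGet?_neg_int _ _ (by omega) (by omega)] at hm
    rw [show arr.length - (-(-(2*g)+(k:Int))).toNat = arr.length - 2*g.toNat + k from by omega,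
        show arr.length - (-(-g+(k:Int))).toNat = arr.length - g.toNat + k from by omega] at hm
    exact hm
  · intro h m hmem
    rw [PySem.List.mem_pyRange_one] at hmem
    have hm := h m.toNat (by omega)
    rw [pyGet?_neg_int _ _ (by omega) (by omega), pyGet?_neg_int _ _ (by omega) (by omega)]
    rw [show arr.length - (-(-(2*g)+m)).toNat = arr.length - 2*g.toNat + m.toNat from by omega,
        show arr.length - (-(-g+m)).toNat = arr.length - g.toNat + m.toNat from by omega]
    exact hm

-- the Z array entry at an admissible g is the exact lcp
lemma zfinal_getD (arr : List Int) (g : Int) (hg2 : 2 ≤ g) (hgn : 2 * g ≤ (arr.length : Int)) :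
    (((PySem.List.pyRange 1 (arr.reverse.length : Int) 1).foldl (zStep arr.reverse)
        (List.replicate arr.reverse.length 0, 0, 0)).1.getD g.toNat 0)
      = lcpN arr.reverse (arr.reverse.drop g.toNat) := by
  have hn4 : 4 ≤ arr.length := by omega
  have hinv := zfold_inv arr.reverse (arr.reverse.length - 1) 1 _ (le_refl 1)
      (by simp; omega) (ZInv_init arr.reverse)
  rw [show 1 + (arr.reverse.length - 1) = arr.reverse.length from by simp; omega] at hinv
  obtain ⟨-, hent, -⟩ := hinv
  have := hent g.toNat (by simp; omega)
  rwa [if_pos ⟨by omega, by simp; omega⟩] at this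

-- the two early-return folds agree when the conditions agree on every element
lemma outer_fold_eq (arr : List Int) (zf : List Nat) (l : List Int)
    (h : ∀ g ∈ l, (aInner arr g = 0 ↔ (g : Int) ≤ (zf.getD g.toNat 0 : Int)))
    (acc : Option Int) :
    l.foldl (fun acc g_len =>
      match acc with
      | some v => some v
      | none => if aInner arr g_len = 0 then some 0 else none) acc
    = l.foldl (fun acc g =>
      match acc with
      | some v => some v
      | none => if (g : Int) ≤ (zf.getD g.toNat 0 : Int) then some 0 else none) acc := by
  induction l generalizing acc with
  | nil => rfl
  | cons x xs ih =>
    have hx := h x (by simp)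
    have hrest : ∀ g ∈ xs, (aInner arr g = 0 ↔ (g : Int) ≤ (zf.getD g.toNat 0 : Int)) :=
      fun g hgmem => h g (by simp [hgmem])
    cases acc with
    | some v => simp only [List.foldl_cons]; exact ih hrest _
    | none =>
      simp only [List.foldl_cons]
      by_cases hc : aInner arr x = 0
      · rw [if_pos hc, if_pos (hx.mp hc)]; exact ih hrest _
      · rw [if_neg hc, if_neg (fun hb => hc (hx.mpr hb))]; exact ih hrest _

-- ===== VERDICT (by name: the statement is the Claim_ definition above) =====
theorem check_good_array_spec : Claim_equal_check_good_array := by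
  intro arr _
  unfold Spec_check_good_array check_good_array check_good_array_alt
  simp only [List.length_reverse]
  rw [outer_fold_eq arr
      ((PySem.List.pyRange 1 ((arr.length : Nat) : Int) 1).foldl (zStep arr.reverse)
        (List.replicate arr.length 0, 0, 0)).1 _ ?_ none]
  intro g hg
  rw [PySem.List.mem_pyRange_one] at hg
  have hfd : PySem.Int.floordiv (arr.length : Int) 2 = (arr.length : Int) / 2 :=
    PySem.Int.floordiv_eq_ediv_of_pos (by omega)
  rw [hfd] at hg
  have hg2 : 2 ≤ g := hg.1
  have hgn : 2 * g ≤ (arr.length : Int) := by omega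
  have hz := zfinal_getD arr g hg2 hgn
  rw [List.length_reverse] at hz
  rw [hz]
  exact cond_iff arr g hg2 hgn
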